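-- pv_equiv track=rewrite | github.com/cyc115/juggle | src/juggle_db.py | _next_excel_label
-- ===== SOURCE A (Python) =====
-- def _next_excel_label(used: set) -> str:
--     """Return first unused Excel-style base-26 label: A..Z, AA..AZ, BA..ZZ."""
--     import string
--     letters = string.ascii_uppercase
--     # Single letter
--     for c in letters:
--         if c not in used:
--             return c
--     # Two letters AA..ZZ
--     for c1 in letters:
--         for c2 in letters:
--             label = c1 + c2
--             if label not in used:
--                 return label
--     raise ValueError("All 702 user labels in use. Archive threads first.")
-- ===== SOURCE B (Python) =====
-- def _next_excel_label(used: set) -> str: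
--     """Return first unused Excel-style base-26 label: A..Z, AA..AZ, BA..ZZ."""
--     for n in range(702):
--         m = n + 1
--         s = ""
--         while m:
--             m, r = divmod(m - 1, 26)
--             s = chr(65 + r) + s
--         if s not in used:
--             return s
--     raise ValueError("All 702 user labels in use. Archive threads first.")
-- ===== Notes on version B (the rewrite author's own statement) =====
-- stated objective: alternative
-- what changed: Replaces A's two tiers of explicit loops (one over single letters, then nested loops over letter pairs) with a single loop over integer index n in range(702) that computes each label arithmetically by bijective base-26 encoding (repeated divmod) and returns the first one not in used.
import Mathlib
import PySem

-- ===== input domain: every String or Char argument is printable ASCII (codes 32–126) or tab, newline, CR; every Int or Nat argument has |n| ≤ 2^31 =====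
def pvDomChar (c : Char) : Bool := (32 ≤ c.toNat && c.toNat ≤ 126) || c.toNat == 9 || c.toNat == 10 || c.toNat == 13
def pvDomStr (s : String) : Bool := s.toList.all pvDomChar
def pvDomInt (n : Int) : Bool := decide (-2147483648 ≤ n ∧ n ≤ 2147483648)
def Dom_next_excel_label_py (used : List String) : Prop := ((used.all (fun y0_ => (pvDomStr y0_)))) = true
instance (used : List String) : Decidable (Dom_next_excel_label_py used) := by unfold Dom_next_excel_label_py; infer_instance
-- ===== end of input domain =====

-- B replaces A's two tiers of loops by a single indexed loop computing each label
-- arithmetically via bijective base-26 (alternative decomposition, same cost).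


-- ===== PORT A =====
def pvLetters : List Char := "ABCDEFGHIJKLMNOPQRSTUVWXYZ".toList

-- first single letter not in used (A's first loop)
def pvSingles (used : List String) : List Char → Option String
  | [] => none
  | c :: rest =>
      if used.contains (String.mk [c]) then pvSingles used rest
      else some (String.mk [c])

-- A's inner loop over c2 for a fixed c1
def pvInner (used : List String) (c1 : Char) : List Char → Option String
  | [] => none
  | c2 :: rest =>
      let label := String.mk [c1, c2]
      if used.contains label then pvInner used c1 rest else some label

-- A's outer loop over c1
def pvOuter (used : List String) : List Char → Option String
  | [] => none
  | c1 :: rest =>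
      match pvInner used c1 pvLetters with
      | some s => some s
      | none => pvOuter used rest

def next_excel_label_py (used : List String) : String :=
  match pvSingles used pvLetters with
  | some s => s
  | none =>
      match pvOuter used pvLetters with
      | some s => s
      | none => ""   -- Python raises ValueError here; excluded by Pre_

-- ===== PORT B =====
-- bijective base-26 digits of m (Source B's while loop; m ≥ 0 throughout in Python, so Nat is
-- exact; the fuel argument only bounds the iteration count — the loop runs at most m times)
def pvBijGo : Nat → Nat → List Char
  | _, 0 => []
  | 0, _ + 1 => []   -- fuel exhausted; never reached when fuel ≥ m
  | f + 1, m + 1 => pvBijGo f (m / 26) ++ [Char.ofNat (65 + m % 26)]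

def pvBij (m : Nat) : List Char := pvBijGo m m

def next_excel_label_py_alt (used : List String) : String :=
  match (List.range 702).find? (fun n => !used.contains (String.mk (pvBij (n + 1)))) with
  | some n => String.mk (pvBij (n + 1))
  | none => ""   -- Python raises ValueError here; excluded by Pre_

set_option maxRecDepth 100000

-- ===== PRECONDITION & SPEC =====
-- the 702 labels in enumeration order (A's shape, lazily evaluable front to back)
def pvLabels : List String :=
  pvLetters.map (fun c => String.mk [c]) ++
    pvLetters.flatMap (fun c1 => pvLetters.map (fun c2 => String.mk [c1, c2]))

-- Pre_ excludes exactly the inputs where the Python A raises ValueError: all 702 labels already used.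
def Pre_next_excel_label_py (used : List String) : Prop :=
  ∃ l ∈ pvLabels, ¬ used.contains l = true
instance (used : List String) : Decidable (Pre_next_excel_label_py used) := by
  unfold Pre_next_excel_label_py; infer_instance

def pvWitness_next_excel_label_py : List String := ["A", "B"]

def Spec_next_excel_label_py (used : List String) (out : String) : Prop := out = next_excel_label_py_alt used
instance (used : List String) (out : String) : Decidable (Spec_next_excel_label_py used out) := by unfold Spec_next_excel_label_py; infer_instance

-- ===== CLAIM (what is proved, stated in full; the proofs are below) =====
def Claim_equal_next_excel_label_py : Prop := ∀ (used : List String), Dom_next_excel_label_py used → Pre_next_excel_label_py used → Spec_next_excel_label_py used (next_excel_label_py used)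

-- ===== LEMMAS AND PROOFS =====
-- "first label of xs not in used, else empty string"
def pvPick (used : List String) (xs : List String) : String :=
  match xs.find? (fun l => !used.contains l) with
  | some l => l
  | none => ""

theorem pvSingles_eq (used : List String) (cs : List Char) :
    pvSingles used cs = (cs.map (fun c => String.mk [c])).find? (fun l => !used.contains l) := by
  induction cs with
  | nil => rfl
  | cons c rest ih =>
      simp only [pvSingles, List.map, List.find?]
      by_cases h : String.mk [c] ∈ used <;> simp [h, ih]

theorem pvInner_eq (used : List String) (c1 : Char) (cs : List Char) :
    pvInner used c1 cs = (cs.map (fun c2 => String.mk [c1, c2])).find? (fun l => !used.contains l) := by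
  induction cs with
  | nil => rfl
  | cons c2 rest ih =>
      simp only [pvInner, List.map, List.find?]
      by_cases h : String.mk [c1, c2] ∈ used <;> simp [h, ih]

theorem pvOuter_eq (used : List String) (cs : List Char) :
    pvOuter used cs =
      (cs.flatMap (fun c1 => pvLetters.map (fun c2 => String.mk [c1, c2]))).find?
        (fun l => !used.contains l) := by
  induction cs with
  | nil => rfl
  | cons c1 rest ih =>
      simp only [pvOuter, List.flatMap_cons, List.find?_append, pvInner_eq, ih]
      cases (pvLetters.map (fun c2 => String.mk [c1, c2])).find? (fun l => !used.contains l) <;> simp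

-- A computes pvPick over the concatenated list of labels
theorem portA_pick (used : List String) :
    next_excel_label_py used = pvPick used pvLabels := by
  simp only [next_excel_label_py, pvPick, pvLabels, pvSingles_eq, pvOuter_eq, List.find?_append]
  cases (pvLetters.map (fun c => String.mk [c])).find? (fun l => !used.contains l) <;> simp

-- B computes pvPick over the arithmetically generated label list
theorem portB_pick (used : List String) :
    next_excel_label_py_alt used =
      pvPick used ((List.range 702).map (fun n => String.mk (pvBij (n + 1)))) := by
  simp only [next_excel_label_py_alt, pvPick, List.find?_map, Function.comp_def]
  cases (List.range 702).find? (fun n => !used.contains (String.mk (pvBij (n + 1)))) <;> rfl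

-- A's enumeration order is exactly the bijective base-26 sequence
theorem charlists_eq :
    pvLetters.map (fun c => ([c] : List Char)) ++
      pvLetters.flatMap (fun c1 => pvLetters.map (fun c2 => [c1, c2])) =
      (List.range 702).map (fun n => pvBij (n + 1)) := by
  decide

theorem labels_eq :
    (List.range 702).map (fun n => String.mk (pvBij (n + 1))) = pvLabels := by
  have h := congrArg (List.map String.mk) charlists_eq
  simpa [pvLabels, List.map_map, List.map_flatMap, Function.comp_def] using h.symm

-- ===== VERDICT (by name: the statement is the Claim_ definition above) =====
theorem next_excel_label_py_spec : Claim_equal_next_excel_label_py := by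
  intro used _ _
  unfold Spec_next_excel_label_py
  rw [portA_pick, portB_pick, labels_eq]
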